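-- pv_equiv track=rewrite | github.com/x-happy-x/dstu-testing | app/utils/__init__.py | discipline_filter
-- ===== SOURCE A (Python) =====
-- def discipline_filter(disciplines: list[str], shorten: list[str] = None, blacklist: list[str] = None):
--     new_list = []
--     if shorten is None:
--         shorten = []
--     if blacklist is None:
--         blacklist = []
--     for discipline in disciplines:
--         skip = False
--         for black_disp in blacklist:
--             if discipline.lower() == black_disp.lower():
--                 skip = True
--                 break
--         if skip:
--             continue
--         for shorten_disp in shorten:
--             if discipline.lower().startswith(shorten_disp.lower()):
--                 if shorten_disp not in new_list:
--                     new_list.append(shorten_disp)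
--                 skip = True
--                 break
--         if skip:
--             continue
--         if discipline not in new_list:
--             new_list.append(discipline)
--     return new_list
-- ===== SOURCE B (Python) =====
-- def discipline_filter(disciplines: list[str], shorten: list[str] = None, blacklist: list[str] = None):
--     if shorten is None:
--         shorten = []
--     if blacklist is None:
--         blacklist = []
--     # pass 1: build the emitted values; blacklist is a precomputed set of lowered names
--     black_set = set()
--     for b in blacklist:
--         black_set.add(b.lower())
--     emitted = []
--     for discipline in disciplines:
--         dl = discipline.lower()
--         if dl in black_set:
--             continue
--         for shorten_disp in shorten:
--             if dl.startswith(shorten_disp.lower()):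
--                 emitted.append(shorten_disp)
--                 break
--         else:
--             emitted.append(discipline)
--     # pass 2: order-preserving dedup with a seen set
--     seen = set()
--     result = []
--     for v in emitted:
--         if v not in seen:
--             seen.add(v)
--             result.append(v)
--     return result
-- ===== Notes on version B (the rewrite author's own statement) =====
-- stated objective: faster
-- what changed: Replaces A's single loop with O(n) accumulator-membership dedup and O(b) blacklist rescans by a two-pass pipeline: pass 1 emits per-discipline values (skipping via a precomputed hash set of lowered blacklist names, taking the first matching shorten prefix via for-else), pass 2 is a separate order-preserving dedup with a seen hash set.
import Mathlib
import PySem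

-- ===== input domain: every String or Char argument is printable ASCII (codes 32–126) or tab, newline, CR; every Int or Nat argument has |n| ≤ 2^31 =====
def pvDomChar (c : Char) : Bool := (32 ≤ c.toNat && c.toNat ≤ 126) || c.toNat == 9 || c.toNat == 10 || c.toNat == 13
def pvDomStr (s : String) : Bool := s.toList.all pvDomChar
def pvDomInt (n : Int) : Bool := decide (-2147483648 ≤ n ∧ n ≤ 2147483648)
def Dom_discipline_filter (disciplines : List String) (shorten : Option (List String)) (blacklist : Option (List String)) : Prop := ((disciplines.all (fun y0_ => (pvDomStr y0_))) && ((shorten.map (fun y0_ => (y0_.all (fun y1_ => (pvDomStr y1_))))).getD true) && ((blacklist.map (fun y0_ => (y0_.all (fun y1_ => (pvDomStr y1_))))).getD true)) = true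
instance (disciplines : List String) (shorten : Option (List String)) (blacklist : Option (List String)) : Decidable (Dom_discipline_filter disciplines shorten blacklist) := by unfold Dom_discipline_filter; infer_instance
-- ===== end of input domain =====

-- B restructures A's single dedup-on-append loop as a two-pass pipeline (emit, then dedup with a seen set); return value proved equal.

-- ===== PORT A =====
-- inner 'for black_disp in blacklist' loop with break
def dfA_black (d : String) : List String → Bool
  | [] => false
  | b :: bs => if PySem.Str.lower d == PySem.Str.lower b then true else dfA_black d bs

-- inner 'for shorten_disp in shorten' loop with break (returns the matching shorten_disp)
def dfA_short (d : String) : List String → Option String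
  | [] => none
  | s :: ss => if PySem.Str.startswith (PySem.Str.lower d) (PySem.Str.lower s) then some s else dfA_short d ss

-- outer 'for discipline in disciplines' loop over accumulator new_list
def dfA_loop (shorten blacklist : List String) : List String → List String → List String
  | new_list, [] => new_list
  | new_list, d :: ds =>
    if dfA_black d blacklist then dfA_loop shorten blacklist new_list ds
    else
      match dfA_short d shorten with
      | some s => dfA_loop shorten blacklist (if new_list.contains s then new_list else new_list ++ [s]) ds
      | none => dfA_loop shorten blacklist (if new_list.contains d then new_list else new_list ++ [d]) ds

def discipline_filter (disciplines : List String) (shorten : Option (List String)) (blacklist : Option (List String)) : List String :=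
  dfA_loop (shorten.getD []) (blacklist.getD []) [] disciplines

-- ===== PORT B =====
-- pass 1 body: one discipline → none (blacklisted) or the emitted value (for-else)
def dfB_emit (shorten : List String) (blackSet : PySem.Set String) (d : String) : Option String :=
  let dl := PySem.Str.lower d
  if blackSet.contains dl then none
  else some ((shorten.find? (fun s => PySem.Str.startswith dl (PySem.Str.lower s))).getD d)

-- pass 2: order-preserving dedup with a seen set
def dfB_dedup (seen : PySem.Set String) : List String → List String
  | [] => []
  | v :: vs => if seen.contains v then dfB_dedup seen vs else v :: dfB_dedup (seen.add v) vs

def discipline_filter_alt (disciplines : List String) (shorten : Option (List String)) (blacklist : Option (List String)) : List String :=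
  let sh := shorten.getD []
  let blackSet : PySem.Set String := PySem.Set.ofList ((blacklist.getD []).map PySem.Str.lower)
  dfB_dedup PySem.Set.empty (disciplines.filterMap (dfB_emit sh blackSet))

-- ===== PRECONDITION & SPEC =====
def Spec_discipline_filter (disciplines : List String) (shorten : Option (List String)) (blacklist : Option (List String)) (out : List String) : Prop := out = discipline_filter_alt disciplines shorten blacklist
instance (disciplines : List String) (shorten : Option (List String)) (blacklist : Option (List String)) (out : List String) : Decidable (Spec_discipline_filter disciplines shorten blacklist out) := by unfold Spec_discipline_filter; infer_instance

-- ===== CLAIM (what is proved, stated in full; the proofs are below) =====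
def Claim_equal_discipline_filter : Prop := ∀ (disciplines : List String) (shorten : Option (List String)) (blacklist : Option (List String)), Dom_discipline_filter disciplines shorten blacklist → Spec_discipline_filter disciplines shorten blacklist (discipline_filter disciplines shorten blacklist)

-- ===== LEMMAS AND PROOFS =====

theorem dfA_black_eq (d : String) (bl : List String) :
    dfA_black d bl = (PySem.Set.ofList (bl.map PySem.Str.lower)).contains (PySem.Str.lower d) := by
  induction bl with
  | nil => rfl
  | cons b bs ih =>
    simp only [dfA_black, List.map_cons]
    by_cases h : PySem.Str.lower d == PySem.Str.lower b
    · simp [PySem.Set.mem_ofList, eq_of_beq h]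
    · simp only [h, if_neg, Bool.false_eq_true, not_false_eq_true, ih]
      simp only [PySem.Set.contains_eq_listContains]
      have hne : ¬ (PySem.Str.lower d = PySem.Str.lower b) := fun he => by simp [he] at h
      rcases Bool.decEq ((PySem.Set.ofList (List.map PySem.Str.lower bs)).contains (PySem.Str.lower d)) true with h2 | h2 <;>
        simp_all [PySem.Set.mem_ofList]

theorem dfA_short_eq (d : String) (sh : List String) :
    dfA_short d sh = sh.find? (fun s => PySem.Str.startswith (PySem.Str.lower d) (PySem.Str.lower s)) := by
  induction sh with
  | nil => rfl
  | cons s ss ih =>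
    by_cases h : PySem.Str.startswith (PySem.Str.lower d) (PySem.Str.lower s)
    · simp only [dfA_short, h, if_pos]
      rw [List.find?_cons_of_pos (by simpa using h)]
    · simp only [dfA_short, h, Bool.false_eq_true, if_neg, not_false_eq_true, ih]
      rw [List.find?_cons_of_neg (by simpa using h)]

-- main invariant: A's loop = new_list ++ (dedup of B's emitted tail against a seen-set matching new_list)
theorem dfA_loop_eq (sh bl : List String) (ds : List String) (acc : List String) (seen : PySem.Set String)
    (hinv : ∀ v, seen.contains v = acc.contains v) :
    dfA_loop sh bl acc ds =
      acc ++ dfB_dedup seen (ds.filterMap (dfB_emit sh (PySem.Set.ofList (bl.map PySem.Str.lower)))) := by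
  induction ds generalizing acc seen with
  | nil => simp [dfA_loop, dfB_dedup]
  | cons d ds ih =>
    simp only [dfA_loop, List.filterMap_cons]
    by_cases hb : dfA_black d bl
    · rw [if_pos hb]
      have hc : (PySem.Set.ofList (bl.map PySem.Str.lower)).contains (PySem.Str.lower d) = true := by
        rw [← dfA_black_eq]; exact hb
      have hnone : dfB_emit sh (PySem.Set.ofList (bl.map PySem.Str.lower)) d = none := by
        simp only [dfB_emit, hc, if_pos]
      rw [hnone, ih acc seen hinv]
    · rw [if_neg hb]
      have hb' : (PySem.Set.ofList (bl.map PySem.Str.lower)).contains (PySem.Str.lower d) = false := by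
        rw [← dfA_black_eq]; simpa using hb
      have hemit : dfB_emit sh (PySem.Set.ofList (bl.map PySem.Str.lower)) d =
          some ((dfA_short d sh).getD d) := by
        simp only [dfB_emit, hb', Bool.false_eq_true, if_neg, not_false_eq_true, dfA_short_eq]
      rw [hemit]
      -- a generic step: appending-if-fresh on both sides agrees
      have step : ∀ (w : String),
          dfA_loop sh bl (if acc.contains w then acc else acc ++ [w]) ds =
            acc ++ dfB_dedup seen
              (w :: ds.filterMap (dfB_emit sh (PySem.Set.ofList (bl.map PySem.Str.lower)))) := by
        intro w
        by_cases hw : acc.contains w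
        · have hsw : seen.contains w = true := by rw [hinv w]; exact hw
          rw [if_pos hw, ih acc seen hinv]
          simp only [dfB_dedup, hsw, if_pos]
        · have hsw : seen.contains w = false := by rw [hinv w]; simpa using hw
          have hinv' : ∀ u, (seen.add w).contains u = (acc ++ [w]).contains u := by
            intro u
            simp only [PySem.Set.add, hsw, Bool.false_eq_true, if_neg, not_false_eq_true]
            have h2 := hinv u
            simp only [PySem.Set.contains_eq_listContains, List.contains_eq_mem] at h2
            simp [h2]
          rw [if_neg hw, ih (acc ++ [w]) (seen.add w) hinv']
          simp only [dfB_dedup, hsw, Bool.false_eq_true, if_neg, not_false_eq_true]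
          simp
      cases hshort : dfA_short d sh with
      | some s => simpa [hshort] using step s
      | none => simpa [hshort] using step d

-- ===== VERDICT (by name: the statement is the Claim_ definition above) =====
theorem discipline_filter_spec : Claim_equal_discipline_filter := by
  intro disciplines shorten blacklist _
  unfold Spec_discipline_filter discipline_filter discipline_filter_alt
  rw [dfA_loop_eq (shorten.getD []) (blacklist.getD []) disciplines [] PySem.Set.empty
    (fun v => rfl)]
  simp [PySem.Set.empty]
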